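-- pv_equiv track=rewrite | github.com/erikherrera00/edgecheck | workers/py/runner.py | _best_span_for_exc
-- ===== SOURCE A (Python) =====
-- from typing import Any, Dict, List, Tuple, Optional, get_origin, get_args
--
-- def _best_span_for_exc(spans: List[Tuple[int,int,int,str]], line: int, exc_name: str) -> Tuple[int, int]:
--     """Pick an AST span on 'line' that best matches the exception kind."""
--     kind = None
--     exc = (exc_name or "").split(".")[-1]
--     if exc == "ZeroDivisionError":
--         kind = "div"
--     elif exc == "IndexError":
--         kind = "subscript"
--
--     # Prefer a span of matching kind on the same line
--     candidates = [(sc, ec) for (ln, sc, ec, k) in spans if ln == line and (kind is None or k == kind)]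
--     if candidates:
--         return min(candidates, key=lambda t: t[0])
--
--     # Any span on the same line
--     candidates = [(sc, ec) for (ln, sc, ec, _k) in spans if ln == line]
--     if candidates:
--         return min(candidates, key=lambda t: t[0])
--
--     # Fallback: underline most of the line
--     return (0, 120)
-- ===== SOURCE B (Python) =====
-- def _best_span_for_exc(spans, line, exc_name):
--     """Single pass over spans tracking best-any and best-kind spans (strict-< first-wins)."""
--     kind = {"ZeroDivisionError": "div", "IndexError": "subscript"}.get((exc_name or "").split(".")[-1])
--     best_any = None
--     best_kind = None
--     for (ln, sc, ec, k) in spans: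
--         if ln != line:
--             continue
--         if best_any is None or sc < best_any[0]:
--             best_any = (sc, ec)
--         if (kind is None or k == kind) and (best_kind is None or sc < best_kind[0]):
--             best_kind = (sc, ec)
--     if best_kind is not None:
--         return best_kind
--     if best_any is not None:
--         return best_any
--     return (0, 120)
-- ===== Notes on version B (the rewrite author's own statement) =====
-- stated objective: alternative
-- what changed: Replaces A's two list-comprehension passes plus two min() scans with one pass over spans maintaining best-any and best-kind candidates under a strict-< first-wins rule, and replaces the if/elif kind chain with a dict lookup.
import Mathlib
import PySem

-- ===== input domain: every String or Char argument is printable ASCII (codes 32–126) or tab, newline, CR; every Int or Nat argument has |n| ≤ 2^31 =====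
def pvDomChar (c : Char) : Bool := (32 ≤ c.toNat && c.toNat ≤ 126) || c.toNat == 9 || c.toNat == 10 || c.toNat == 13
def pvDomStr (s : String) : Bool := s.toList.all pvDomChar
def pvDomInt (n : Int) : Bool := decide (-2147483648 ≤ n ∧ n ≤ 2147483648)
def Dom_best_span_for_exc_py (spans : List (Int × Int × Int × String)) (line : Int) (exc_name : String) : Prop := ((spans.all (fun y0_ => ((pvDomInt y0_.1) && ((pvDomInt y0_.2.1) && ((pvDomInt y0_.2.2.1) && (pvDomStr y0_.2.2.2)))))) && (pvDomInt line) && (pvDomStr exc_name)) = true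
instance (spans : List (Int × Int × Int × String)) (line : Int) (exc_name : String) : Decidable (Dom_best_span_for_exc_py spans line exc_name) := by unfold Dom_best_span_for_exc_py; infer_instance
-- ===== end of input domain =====

-- B replaces A's two filter-then-min passes with a single pass tracking best-any/best-kind (alternative decomposition, same cost).


-- ===== PORT A =====
def best_span_for_exc_py (spans : List (Int × Int × Int × String)) (line : Int) (exc_name : String) : Int × Int :=
  -- exc = (exc_name or "").split(".")[-1]  (split by "." is always nonempty, so [-1] = last)
  let exc : String := match PySem.Str.split? exc_name "." with
    | some parts => parts.getLastD ""
    | none => ""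
  let kind : Option String :=
    if exc = "ZeroDivisionError" then some "div"
    else if exc = "IndexError" then some "subscript"
    else none
  let cand1 : List (Int × Int) :=
    (spans.filter (fun s => s.1 == line && (kind.elim true (fun kd => s.2.2.2 == kd)))).map
      (fun s => (s.2.1, s.2.2.1))
  match PySem.List.min? cand1 (fun t => t.1) with
  | some m => m
  | none =>
    let cand2 : List (Int × Int) :=
      (spans.filter (fun s => s.1 == line)).map (fun s => (s.2.1, s.2.2.1))
    match PySem.List.min? cand2 (fun t => t.1) with
    | some m => m
    | none => (0, 120)

-- ===== PORT B =====
-- 'best is None or sc < best[0]' update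
def pvBump (b : Option (Int × Int)) (x : Int × Int) : Option (Int × Int) :=
  match b with
  | none => some x
  | some m => if x.1 < m.1 then some x else some m

def pvStep (line : Int) (kind : Option String) (st : Option (Int × Int) × Option (Int × Int))
    (s : Int × Int × Int × String) : Option (Int × Int) × Option (Int × Int) :=
  if s.1 == line then
    ( pvBump st.1 (s.2.1, s.2.2.1),
      if kind.elim true (fun kd => s.2.2.2 == kd) then pvBump st.2 (s.2.1, s.2.2.1) else st.2 )
  else st

def best_span_for_exc_py_alt (spans : List (Int × Int × Int × String)) (line : Int) (exc_name : String) : Int × Int :=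
  let exc : String := match PySem.Str.split? exc_name "." with
    | some parts => parts.getLastD ""
    | none => ""
  let kind : Option String :=
    PySem.Dict.get? (PySem.Dict.ofList [("ZeroDivisionError", "div"), ("IndexError", "subscript")]) exc
  let st := spans.foldl (pvStep line kind) (none, none)
  match st.2 with
  | some m => m
  | none =>
    match st.1 with
    | some m => m
    | none => (0, 120)

-- ===== PRECONDITION & SPEC =====
def Spec_best_span_for_exc_py (spans : List (Int × Int × Int × String)) (line : Int) (exc_name : String) (out : Int × Int) : Prop := out = best_span_for_exc_py_alt spans line exc_name
instance (spans : List (Int × Int × Int × String)) (line : Int) (exc_name : String) (out : Int × Int) : Decidable (Spec_best_span_for_exc_py spans line exc_name out) := by unfold Spec_best_span_for_exc_py; infer_instance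

-- ===== CLAIM (what is proved, stated in full; the proofs are below) =====
def Claim_equal_best_span_for_exc_py : Prop := ∀ (spans : List (Int × Int × Int × String)) (line : Int) (exc_name : String), Dom_best_span_for_exc_py spans line exc_name → Spec_best_span_for_exc_py spans line exc_name (best_span_for_exc_py spans line exc_name)

-- ===== LEMMAS AND PROOFS =====

-- the literal two-entry dict lookup agrees with A's if/elif chain
theorem pvKindEq (exc : String) :
    PySem.Dict.get? (PySem.Dict.ofList [("ZeroDivisionError", "div"), ("IndexError", "subscript")]) exc =
      (if exc = "ZeroDivisionError" then some "div"
       else if exc = "IndexError" then some "subscript" else none) := by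
  have hit : (PySem.Dict.ofList [("ZeroDivisionError", "div"), ("IndexError", "subscript")]).items =
      [("ZeroDivisionError", "div"), ("IndexError", "subscript")] := by decide
  by_cases h1 : exc = "ZeroDivisionError"
  · subst h1; decide
  · by_cases h2 : exc = "IndexError"
    · subst h2; decide
    · have hA : (("ZeroDivisionError" : String) == exc) = false := by
        simp [beq_eq_false_iff_ne]; exact fun h => h1 h.symm
      have hB : (("IndexError" : String) == exc) = false := by
        simp [beq_eq_false_iff_ne]; exact fun h => h2 h.symm
      simp [PySem.Dict.get?, hit, List.find?_cons, hA, hB, h1, h2]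

-- PySem's min?-by-first-component is the pvBump fold
theorem pvMinEq (cs : List (Int × Int)) :
    PySem.List.min? cs (fun t => t.1) = cs.foldl pvBump none := by
  unfold PySem.List.min?
  generalize (none : Option (Int × Int)) = acc
  induction cs generalizing acc with
  | nil => rfl
  | cons h t ih =>
    simp only [List.foldl_cons]
    rw [ih]
    congr 1
    cases acc <;> rfl

-- pvBump-folds over filtered/mapped lists distribute over appending one candidate
theorem pvFoldSplit (line : Int) (kind : Option String) :
    ∀ (l : List (Int × Int × Int × String)) (a0 k0 : Option (Int × Int)),
      l.foldl (pvStep line kind) (a0, k0) =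
        ( ((l.filter (fun s => s.1 == line)).map (fun s => (s.2.1, s.2.2.1))).foldl pvBump a0,
          ((l.filter (fun s => s.1 == line && (kind.elim true (fun kd => s.2.2.2 == kd)))).map
              (fun s => (s.2.1, s.2.2.1))).foldl pvBump k0 ) := by
  intro l
  induction l with
  | nil => intro a0 k0; rfl
  | cons h t ih =>
    intro a0 k0
    by_cases hl : h.1 = line
    · by_cases hk : kind.elim true (fun kd => h.2.2.2 == kd) = true
      · simp [List.foldl_cons, pvStep, hl, hk, ih]
      · simp [List.foldl_cons, pvStep, hl, hk, ih]
    · simp [List.foldl_cons, pvStep, hl, ih]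

-- ===== VERDICT (by name: the statement is the Claim_ definition above) =====
theorem best_span_for_exc_py_spec : Claim_equal_best_span_for_exc_py := by
  intro spans line exc_name _
  unfold Spec_best_span_for_exc_py best_span_for_exc_py best_span_for_exc_py_alt
  simp only [pvKindEq, pvFoldSplit, pvMinEq]
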